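-- pv_equiv track=rewrite | github.com/nishitkshah/My-Codeforces-Submissions | Contests/CF018_/C/C_1_d1.py | s_sum
-- ===== SOURCE A (Python) =====
-- M = 1000000007
--
-- def s_sum(d):
-- 	if d<1:
-- 		return 0
-- 	s = [0, 0]	#odd, even
-- 	p = 1
-- 	t = 0
-- 	while p<=d:
-- 		s[t] += p
-- 		d -= p
-- 		p *= 2
-- 		t = 1-t
-- 	s[t] += d
-- 	nodd = s[0]
-- 	neven = s[1]
-- 	return ((nodd*nodd)%M + (neven*(neven+1))%M)%M
-- ===== SOURCE B (Python) =====
-- M = 1000000007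
--
-- def s_sum(d):
--     # closed form: k = floor-log2 iteration count, geometric bucket sums
--     if d < 1:
--         return 0
--     k = (d + 1).bit_length() - 1
--     rem = d - (2**k - 1)
--     nodd = (4**((k + 1) // 2) - 1) // 3
--     neven = 2 * ((4**(k // 2) - 1) // 3)
--     if k % 2 == 0:
--         nodd += rem
--     else:
--         neven += rem
--     return ((nodd * nodd) % M + (neven * (neven + 1)) % M) % M
-- ===== Notes on version B (the rewrite author's own statement) =====
-- stated objective: alternative
-- what changed: Replaced the doubling while-loop that accumulates powers of two into odd/even parity buckets by a closed form: floor-log2 gives the iteration count, geometric-series formulas give the two bucket sums, and the remainder is added to the bucket matching the count's parity.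
import Mathlib
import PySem

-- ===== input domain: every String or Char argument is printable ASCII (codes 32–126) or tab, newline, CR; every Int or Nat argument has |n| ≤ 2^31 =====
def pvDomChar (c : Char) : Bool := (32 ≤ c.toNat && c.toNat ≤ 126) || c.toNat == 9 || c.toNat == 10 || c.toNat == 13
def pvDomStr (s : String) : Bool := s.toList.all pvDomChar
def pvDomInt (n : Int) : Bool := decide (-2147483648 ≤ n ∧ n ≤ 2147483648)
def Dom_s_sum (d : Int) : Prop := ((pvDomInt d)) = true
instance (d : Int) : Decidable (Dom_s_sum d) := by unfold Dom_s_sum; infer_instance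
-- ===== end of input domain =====

-- B replaces A's doubling while-loop by a closed form (floor-log2 iteration count, geometric bucket sums); objective: alternative algorithm.

-- ===== PORT A =====
-- the while loop: state (d, p, t, s0, s1); returns (d, t, s0, s1) at exit.
-- '1 ≤ p' in the guard is a totality guard only: every call has p ≥ 1 (p starts at 1 and doubles).
def s_sum_loop (d p t s0 s1 : Int) : Int × Int × Int × Int :=
  if h : 1 ≤ p ∧ p ≤ d then
    s_sum_loop (d - p) (p * 2) (1 - t)
      (if t = 0 then s0 + p else s0) (if t = 0 then s1 else s1 + p)
  else
    (d, t, s0, s1)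
termination_by d.toNat
decreasing_by omega

def s_sum (d : Int) : Int :=
  if d < 1 then 0
  else
    let r := s_sum_loop d 1 0 0 0
    let dr := r.1
    let t := r.2.1
    let s0 := if t = 0 then r.2.2.1 + dr else r.2.2.1
    let s1 := if t = 0 then r.2.2.2 else r.2.2.2 + dr
    let nodd := s0
    let neven := s1
    PySem.Int.mod (PySem.Int.mod (nodd * nodd) 1000000007
      + PySem.Int.mod (neven * (neven + 1)) 1000000007) 1000000007

-- ===== PORT B =====
def s_sum_alt (d : Int) : Int :=
  if d < 1 then 0
  else
    let k : Nat := Nat.log2 (d + 1).toNat          -- (d+1).bit_length() - 1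
    let rem := d - ((2:Int) ^ k - 1)
    let nodd := PySem.Int.floordiv ((4:Int) ^ ((k + 1) / 2) - 1) 3
    let neven := 2 * PySem.Int.floordiv ((4:Int) ^ (k / 2) - 1) 3
    let nodd := if k % 2 = 0 then nodd + rem else nodd
    let neven := if k % 2 = 0 then neven else neven + rem
    PySem.Int.mod (PySem.Int.mod (nodd * nodd) 1000000007
      + PySem.Int.mod (neven * (neven + 1)) 1000000007) 1000000007

-- ===== PRECONDITION & SPEC =====
def Spec_s_sum (d : Int) (out : Int) : Prop := out = s_sum_alt d
instance (d : Int) (out : Int) : Decidable (Spec_s_sum d out) := by unfold Spec_s_sum; infer_instance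

-- ===== CLAIM (what is proved, stated in full; the proofs are below) =====
def Claim_equal_s_sum : Prop := ∀ (d : Int), Dom_s_sum d → Spec_s_sum d (s_sum d)

-- ===== LEMMAS AND PROOFS =====

-- bucket sums after k loop iterations starting at parity 0: (even-index sum, odd-index sum)
def pvAB : Nat → Int × Int
  | 0 => (0, 0)
  | k + 1 => (1 + 2 * (pvAB k).2, 2 * (pvAB k).1)

-- exact geometric quotient (4^m - 1)/3
def pvG : Nat → Int
  | 0 => 0
  | m + 1 => 4 * pvG m + 1

theorem pvG_mul3 (m : Nat) : 3 * pvG m = 4 ^ m - 1 := by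
  induction m with
  | zero => simp [pvG]
  | succ m ih => simp [pvG, pow_succ]; linarith

theorem pvG_floordiv (m : Nat) : PySem.Int.floordiv ((4:Int) ^ m - 1) 3 = pvG m := by
  rw [← pvG_mul3, PySem.Int.floordiv_eq_ediv_of_pos (by norm_num)]
  omega

theorem pvAB_eq (k : Nat) : (pvAB k).1 = pvG ((k + 1) / 2) ∧ (pvAB k).2 = 2 * pvG (k / 2) := by
  induction k with
  | zero => simp [pvAB, pvG]
  | succ k ih =>
    obtain ⟨h1, h2⟩ := ih
    constructor
    · show 1 + 2 * (pvAB k).2 = pvG ((k + 1 + 1) / 2)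
      have hdiv : (k + 1 + 1) / 2 = k / 2 + 1 := by omega
      rw [h2, hdiv, pvG]; ring
    · show 2 * (pvAB k).1 = 2 * pvG ((k + 1) / 2)
      rw [h1]

theorem s_sum_loop_eq (k : Nat) : ∀ (n p t s0 s1 : Int), 1 ≤ p → (t = 0 ∨ t = 1) →
    p * (2 ^ k - 1) ≤ n → n < p * (2 ^ (k + 1) - 1) →
    s_sum_loop n p t s0 s1 =
      (n - p * (2 ^ k - 1), (t + (k : Int)) % 2,
       s0 + p * (if t = 0 then (pvAB k).1 else (pvAB k).2),
       s1 + p * (if t = 0 then (pvAB k).2 else (pvAB k).1)) := by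
  induction k with
  | zero =>
    intro n p t s0 s1 hp ht hlo hhi
    rw [s_sum_loop]
    have hng : ¬ (1 ≤ p ∧ p ≤ n) := by
      simp [pow_succ] at hhi; omega
    rw [dif_neg hng]
    simp [pvAB]
    rcases ht with h | h <;> simp [h]
  | succ k ih =>
    intro n p t s0 s1 hp ht hlo hhi
    have h2k : (1:Int) ≤ 2 ^ k := one_le_pow₀ (by norm_num)
    have hpn : p ≤ n := by
      have h1 : (1:Int) ≤ 2 ^ (k + 1) - 1 := by rw [pow_succ]; nlinarith
      nlinarith
    rw [s_sum_loop, dif_pos ⟨hp, hpn⟩]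
    have hlo' : (p * 2) * (2 ^ k - 1) ≤ n - p := by
      rw [pow_succ] at hlo; nlinarith
    have hhi' : n - p < (p * 2) * (2 ^ (k + 1) - 1) := by
      rw [pow_succ (2:Int) (k+1)] at hhi; nlinarith
    rcases ht with h | h <;> subst h <;> norm_num
    · rw [ih (n - p) (p * 2) 1 (s0 + p) s1 (by omega) (Or.inr rfl) hlo' hhi']
      simp only [pvAB, Prod.mk.injEq]
      norm_num
      refine ⟨by rw [pow_succ]; ring, by omega, by ring, by ring⟩
    · rw [ih (n - p) (p * 2) 0 s0 (s1 + p) (by omega) (Or.inl rfl) hlo' hhi']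
      simp only [pvAB, Prod.mk.injEq]
      norm_num
      refine ⟨by rw [pow_succ]; ring, by omega, by ring, by ring⟩

theorem s_sum_eq_alt (d : Int) : s_sum d = s_sum_alt d := by
  by_cases hd : d < 1
  · simp [s_sum, s_sum_alt, hd]
  · have hd0 : (0:Int) ≤ d + 1 := by omega
    set k := Nat.log2 (d + 1).toNat with hk
    have hne : (d + 1).toNat ≠ 0 := by omega
    have hlo : 2 ^ k ≤ (d + 1).toNat := Nat.log2_self_le hne
    have hhi : (d + 1).toNat < 2 ^ (k + 1) := Nat.lt_log2_self
    have hloI : (2:Int) ^ k ≤ d + 1 := by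
      have := (Nat.cast_le (α := Int)).2 hlo
      push_cast at this; omega
    have hhiI : d + 1 < (2:Int) ^ (k + 1) := by
      have := (Nat.cast_lt (α := Int)).2 hhi
      push_cast at this; omega
    have hloop := s_sum_loop_eq k d 1 0 0 0 (by norm_num) (Or.inl rfl)
      (by omega) (by omega)
    simp only [s_sum, s_sum_alt, if_neg (by omega : ¬ d < 1)]
    rw [hloop]
    simp only [one_mul, zero_add]
    obtain ⟨hA1, hA2⟩ := pvAB_eq k
    rw [pvG_floordiv, pvG_floordiv, ← hA1, ← hA2]
    rw [← hk]
    by_cases hke : k % 2 = 0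
    · have hkeI : ((k : Int) % 2 = 0) := by omega
      simp only [if_true, if_pos hke, if_pos hkeI]
    · have hkeI : ¬ ((k : Int) % 2 = 0) := by omega
      simp only [if_true, if_neg hke, if_neg hkeI]

-- ===== VERDICT (by name: the statement is the Claim_ definition above) =====
theorem s_sum_spec : Claim_equal_s_sum := by
  intro d _
  unfold Spec_s_sum
  exact s_sum_eq_alt d
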